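-- pv_equiv track=rewrite | github.com/abelBEDOYA/HUMV-qupath-handler | qupath_handler.py | _shapes_are_pyramid
-- ===== SOURCE A (Python) =====
-- from typing import Tuple, List, Dict, Any
--
-- def _shapes_are_pyramid(shapes: List[Tuple]) -> bool:
--     """Verifica si las shapes corresponden a una pirámide (tamaños decrecientes)."""
--     if len(shapes) < 2:
--         return False
--
--     # Extraer el tamaño principal de cada shape
--     sizes = []
--     for shape in shapes:
--         # Tomar las dos dimensiones más grandes
--         dims = sorted(shape, reverse=True)[:2]
--         sizes.append(max(dims))
--
--     # Verificar que son decrecientes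
--     for i in range(1, len(sizes)):
--         if sizes[i] >= sizes[i-1]:
--             return False
--     return True
-- ===== SOURCE B (Python) =====
-- def _shapes_are_pyramid(shapes):
--     """Strictly decreasing iff the sizes equal the sorted-descending list of their distinct values."""
--     if len(shapes) < 2:
--         return False
--     sizes = [max(s) for s in shapes]
--     return sizes == sorted(set(sizes), reverse=True)
-- ===== Notes on version B (the rewrite author's own statement) =====
-- stated objective: alternative
-- what changed: Replaces the pairwise adjacent-comparison scan by a set/sort characterization: the sequence of per-shape maxima is strictly decreasing iff it equals the descending sort of its distinct values, so B builds a set, sorts it in reverse, and compares for list equality; it also takes max(s) directly instead of A's per-shape sort.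
import Mathlib
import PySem

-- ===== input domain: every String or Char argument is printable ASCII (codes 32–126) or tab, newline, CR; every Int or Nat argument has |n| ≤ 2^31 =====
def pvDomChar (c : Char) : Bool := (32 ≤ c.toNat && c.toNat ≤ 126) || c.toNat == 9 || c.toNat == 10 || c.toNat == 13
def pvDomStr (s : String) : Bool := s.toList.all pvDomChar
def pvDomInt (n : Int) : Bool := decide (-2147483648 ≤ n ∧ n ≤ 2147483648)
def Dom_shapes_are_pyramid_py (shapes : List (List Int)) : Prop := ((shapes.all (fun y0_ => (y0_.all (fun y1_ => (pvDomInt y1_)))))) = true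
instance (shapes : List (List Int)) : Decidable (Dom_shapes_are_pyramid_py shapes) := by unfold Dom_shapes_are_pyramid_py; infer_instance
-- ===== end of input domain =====

-- B checks decreasing-ness by a set/sort characterization (sizes equal the descending sort of their distinct values) instead of A's adjacent-pair scan; objective: alternative.

-- ===== PORT A =====
-- size of one shape: max of the two largest dimensions (sorted desc, take 2, max);
-- max() of an empty shape raises in Python (excluded by Pre_), here getD 0 is unreachable under Pre_
def pvSizeA (shape : List Int) : Int :=
  (PySem.List.max? ((PySem.List.sorted shape (fun x => x) true).take 2) (fun x => x)).getD 0

-- the second loop: for i in range(1, len(sizes)): if sizes[i] >= sizes[i-1]: return False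
def pvCheckDec : List Int → Bool
  | a :: b :: rest => if b ≥ a then false else pvCheckDec (b :: rest)
  | _ => true

def shapes_are_pyramid_py (shapes : List (List Int)) : Bool :=
  if shapes.length < 2 then false
  else pvCheckDec (shapes.map pvSizeA)

-- ===== PORT B =====
-- sizes = [max(s) for s in shapes]; return sizes == sorted(set(sizes), reverse=True)
-- max(s) raises on an empty shape in Python (excluded by Pre_); getD 0 unreachable under Pre_
def shapes_are_pyramid_py_alt (shapes : List (List Int)) : Bool :=
  if shapes.length < 2 then false
  else
    let sizes := shapes.map (fun s => (PySem.List.max? s (fun x => x)).getD 0)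
    decide (sizes = PySem.List.sorted (PySem.Set.ofList sizes) (fun x => x) true)

-- ===== PRECONDITION & SPEC =====
-- Pre_ excludes only inputs where Python A raises ValueError (max of an empty shape,
-- reachable only when there are at least two shapes); B raises there too.
def Pre_shapes_are_pyramid_py (shapes : List (List Int)) : Prop :=
  shapes.length < 2 ∨ ∀ s ∈ shapes, s ≠ []
instance (shapes : List (List Int)) : Decidable (Pre_shapes_are_pyramid_py shapes) := by
  unfold Pre_shapes_are_pyramid_py; infer_instance

def pvWitness_shapes_are_pyramid_py : List (List Int) := [[5, 3], [4], [2, 1]]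

def Spec_shapes_are_pyramid_py (shapes : List (List Int)) (out : Bool) : Prop := out = shapes_are_pyramid_py_alt shapes
instance (shapes : List (List Int)) (out : Bool) : Decidable (Spec_shapes_are_pyramid_py shapes out) := by unfold Spec_shapes_are_pyramid_py; infer_instance

-- ===== CLAIM (what is proved, stated in full; the proofs are below) =====
def Claim_equal_shapes_are_pyramid_py : Prop := ∀ (shapes : List (List Int)), Dom_shapes_are_pyramid_py shapes → Pre_shapes_are_pyramid_py shapes → Spec_shapes_are_pyramid_py shapes (shapes_are_pyramid_py shapes)

-- ===== LEMMAS AND PROOFS =====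

-- the max of the two largest elements is the max of the whole (nonempty) list
theorem pvSizeA_eq_max (s : List Int) (hs : s ≠ []) :
    pvSizeA s = (PySem.List.max? s (fun x => x)).getD 0 := by
  unfold pvSizeA
  obtain ⟨m, hm⟩ : ∃ m, PySem.List.max? s (fun x => x) = some m := by
    cases h : PySem.List.max? s (fun x => x) with
    | none => exact absurd ((PySem.List.max?_eq_none_iff _ _).mp h) hs
    | some m => exact ⟨m, rfl⟩
  rw [hm]
  cases hsort : PySem.List.sorted s (fun x => x) true with
  | nil => exact absurd ((PySem.List.sorted_eq_nil_iff _ _ _).mp hsort) hs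
  | cons a t =>
    obtain ⟨m', hm'⟩ : ∃ m',
        PySem.List.max? ((a :: t).take 2) (fun x => x) = some m' := by
      cases h : PySem.List.max? ((a :: t).take 2) (fun x => x) with
      | none => simp [List.take] at h
      | some m' => exact ⟨m', rfl⟩
    rw [hm']
    simp only [Option.getD_some]
    have hm'mem : m' ∈ (a :: t).take 2 := PySem.List.max?_mem hm'
    have hm'S : m' ∈ s := by
      have : m' ∈ a :: t := List.mem_of_mem_take hm'mem
      rw [← hsort] at this
      exact (PySem.List.mem_sorted _ _ _ _).mp this
    have h1 : m' ≤ m := PySem.List.max?_isMax hm m' hm'S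
    have h2 : a ≤ m' := by
      have ha : a ∈ (a :: t).take 2 := by simp [List.take]
      exact PySem.List.max?_isMax hm' a ha
    have h3 : m ≤ a := by
      have hmS : m ∈ s := PySem.List.max?_mem hm
      exact PySem.List.key_head_sorted_rev_ge s (fun x => x) hsort m hmS
    omega

-- A's pairwise scan decides strict decrease of the whole list (transitivity)
theorem pvCheckDec_iff_pairwise (l : List Int) :
    pvCheckDec l = true ↔ l.Pairwise (fun a b => a > b) := by
  induction l with
  | nil => simp [pvCheckDec]
  | cons a t ih =>
    cases t with
    | nil => simp [pvCheckDec]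
    | cons b r =>
      simp only [pvCheckDec]
      split_ifs with h
      · simp only [false_iff]
        intro hp
        have := List.rel_of_pairwise_cons hp (List.mem_cons_self ..)
        omega
      · rw [ih]
        constructor
        · intro hr
          refine List.pairwise_cons.mpr ⟨?_, hr⟩
          intro x hx
          rcases List.mem_cons.mp hx with rfl | hx
          · omega
          · have := List.rel_of_pairwise_cons hr hx; omega
        · intro hp; exact hp.of_cons

-- the characterization: l is strictly decreasing iff l = sorted(set(l), reverse=True)
theorem pairwise_iff_sorted_set (l : List Int) :
    l.Pairwise (fun a b => a > b) ↔
      l = PySem.List.sorted (PySem.Set.ofList l) (fun x => x) true := by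
  constructor
  · intro hpw
    have hnd : l.Nodup := hpw.imp (fun h => by omega)
    have hperm : l.Perm (PySem.Set.ofList l) := by
      rw [List.perm_ext_iff_of_nodup hnd (PySem.Set.nodup_ofList l)]
      intro a; exact (PySem.Set.mem_ofList ..).symm
    exact (PySem.List.sorted_rev_eq_of_perm_of_pairwise_gt _ _ _ hperm
      (hpw.imp (fun h => by omega))).symm
  · intro he
    have hnd : (PySem.List.sorted (PySem.Set.ofList l) (fun x => x) true).Nodup :=
      (PySem.List.sorted_perm _ _ _).nodup_iff.mpr (PySem.Set.nodup_ofList l)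
    have hge : (PySem.List.sorted (PySem.Set.ofList l) (fun x => x) true).Pairwise
        (fun a b => (fun x => x) b ≤ (fun x => x) a) := PySem.List.sorted_pairwise_rev _ _
    rw [he]
    refine (hnd.and hge).imp ?_
    rintro a b ⟨hne, hle⟩
    simp only at hle
    rcases lt_or_eq_of_le hle with h | h
    · omega
    · exact absurd h.symm hne

-- ===== VERDICT (by name: the statement is the Claim_ definition above) =====
theorem shapes_are_pyramid_py_spec : Claim_equal_shapes_are_pyramid_py := by
  intro shapes _ hpre
  unfold Spec_shapes_are_pyramid_py shapes_are_pyramid_py shapes_are_pyramid_py_alt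
  split_ifs with hlen
  · rfl
  · have hne : ∀ s ∈ shapes, s ≠ [] := by
      cases hpre with
      | inl h => exact absurd h hlen
      | inr h => exact h
    have hmap : shapes.map pvSizeA
        = shapes.map (fun s => (PySem.List.max? s (fun x => x)).getD 0) :=
      List.map_congr_left (fun s hs => pvSizeA_eq_max s (hne s hs))
    rw [hmap, Bool.eq_iff_iff, pvCheckDec_iff_pairwise, pairwise_iff_sorted_set]
    simp
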